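-- pv_equiv track=rewrite | github.com/ChadThackray/litecharts | src/litecharts/render.py | _renderTimeSyncJs
-- ===== SOURCE A (Python) =====
-- def _renderTimeSyncJs(chartVars: list[str]) -> str:
--     """Generate JS code to sync time scales across charts.
--
--     Args:
--         chartVars: List of chart variable names.
--
--     Returns:
--         JavaScript code string.
--     """
--     if len(chartVars) < 2:
--         return ""
--
--     lines = []
--     for i, chartVar in enumerate(chartVars):
--         otherVars = [v for j, v in enumerate(chartVars) if j != i]
--         listeners = ", ".join(
--             f"{v}.timeScale().setVisibleLogicalRange(range)" for v in otherVars
--         )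
--         lines.append(
--             f"{chartVar}.timeScale().subscribeVisibleLogicalRangeChange("
--             f"range => {{ if (range) {{ {listeners}; }} }});"
--         )
--
--     return "\n    ".join(lines)
-- ===== SOURCE B (Python) =====
-- def _renderTimeSyncJs(chartVars: list[str]) -> str:
--     """Generate JS code to sync time scales across charts.
--
--     Prefix/suffix join-table version ("product except self"): the body for chart i
--     is glued from the join of actions before i and the join of actions after i,
--     both precomputed in two linear passes, so no per-chart re-join of all others.
--     """
--     if len(chartVars) < 2:
--         return ""
--
--     def glue(p, s):
--         return p + ", " + s if p and s else p + s
--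
--     acts = [v + ".timeScale().setVisibleLogicalRange(range)" for v in chartVars]
--     pre = [""]
--     for a in acts:
--         pre.append(glue(pre[-1], a))
--     suf = [""]
--     for a in reversed(acts):
--         suf.append(glue(a, suf[-1]))
--     suf.reverse()
--     lines = [
--         cv + ".timeScale().subscribeVisibleLogicalRangeChange(range => { if (range) { "
--         + glue(p, s) + "; } });"
--         for cv, (p, s) in zip(chartVars, zip(pre, suf[1:]))
--     ]
--     return "\n    ".join(lines)
-- ===== Notes on version B (the rewrite author's own statement) =====
-- stated objective: alternative
-- what changed: B uses the prefix/suffix table technique ('product except self'): two linear gluing passes build tables of the joined actions before and after each index, and every listener body is then a single glue of pre[i] and suf[i+1], instead of A's per-chart re-enumeration, filtering and re-join of all other charts.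
import Mathlib
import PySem

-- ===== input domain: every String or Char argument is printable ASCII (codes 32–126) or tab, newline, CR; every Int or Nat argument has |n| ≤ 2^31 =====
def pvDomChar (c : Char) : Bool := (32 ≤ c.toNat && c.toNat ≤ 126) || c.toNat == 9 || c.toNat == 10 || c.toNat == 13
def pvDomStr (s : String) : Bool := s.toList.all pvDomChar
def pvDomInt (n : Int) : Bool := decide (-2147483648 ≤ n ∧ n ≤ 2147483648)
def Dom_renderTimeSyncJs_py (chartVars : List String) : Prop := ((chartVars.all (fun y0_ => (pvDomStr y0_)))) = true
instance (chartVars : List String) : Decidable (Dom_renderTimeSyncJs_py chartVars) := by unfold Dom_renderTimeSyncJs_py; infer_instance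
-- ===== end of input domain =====

-- B replaces A's per-chart re-join of all other charts by prefix/suffix join tables
-- ("product except self"): two linear gluing passes, then each body is one glue (alternative).

-- ===== PORT A =====
def renderTimeSyncJs_py (chartVars : List String) : String :=
  if chartVars.length < 2 then "" else
    let lines := (PySem.List.enumerate chartVars).foldl (fun lines p =>
      let otherVars := ((PySem.List.enumerate chartVars).filter (fun q => q.1 != p.1)).map Prod.snd
      let listeners := PySem.Str.join ", "
        (otherVars.map (fun v => v ++ ".timeScale().setVisibleLogicalRange(range)"))
      lines ++ [p.2 ++ ".timeScale().subscribeVisibleLogicalRangeChange(range => { if (range) { "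
                ++ listeners ++ "; } });"]) []
    PySem.Str.join "\n    " lines

-- ===== PORT B =====
-- glue(p, s): join two already-joined fragments, inserting ", " only when both are nonempty
def pvGlue (p s : String) : String := if p ≠ "" ∧ s ≠ "" then p ++ ", " ++ s else p ++ s

def renderTimeSyncJs_py_alt (chartVars : List String) : String :=
  if chartVars.length < 2 then "" else
    let acts := chartVars.map (fun v => v ++ ".timeScale().setVisibleLogicalRange(range)")
    let pre := acts.foldl (fun ps a => ps ++ [pvGlue (ps.getLastD "") a]) [""]
    let suf := (acts.reverse.foldl (fun ss a => ss ++ [pvGlue a (ss.getLastD "")]) [""]).reverse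
    let lines := (chartVars.zip (pre.zip (suf.drop 1))).map (fun t =>
      t.1 ++ ".timeScale().subscribeVisibleLogicalRangeChange(range => { if (range) { "
        ++ pvGlue t.2.1 t.2.2 ++ "; } });")
    PySem.Str.join "\n    " lines

-- ===== PRECONDITION & SPEC =====
def Spec_renderTimeSyncJs_py (chartVars : List String) (out : String) : Prop := out = renderTimeSyncJs_py_alt chartVars
instance (chartVars : List String) (out : String) : Decidable (Spec_renderTimeSyncJs_py chartVars out) := by unfold Spec_renderTimeSyncJs_py; infer_instance

-- ===== CLAIM =====
def Claim_equal_renderTimeSyncJs_py : Prop := ∀ (chartVars : List String), Dom_renderTimeSyncJs_py chartVars → Spec_renderTimeSyncJs_py chartVars (renderTimeSyncJs_py chartVars)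

-- ===== LEMMAS AND PROOFS =====

-- the append-accumulating foldl is the map
theorem pv_foldl_map {α β : Type} (g : α → β) (xs : List α) (acc : List β) :
    xs.foldl (fun acc p => acc ++ [g p]) acc = acc ++ xs.map g := by
  induction xs generalizing acc with
  | nil => simp
  | cons x xs ih => simp [List.foldl_cons, ih]

-- filtering an enumeration whose indices all exceed i keeps everything
theorem pv_filter_enum_all {α : Type} (xs : List α) (s i : Int) (h : i < s) :
    (((PySem.List.enumerate xs s).filter (fun q => q.1 != i)).map Prod.snd) = xs := by
  induction xs generalizing s with
  | nil => simp [PySem.List.enumerate_nil]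
  | cons x xs ih =>
      have hne : (s != i) = true := by simp; omega
      simp [PySem.List.enumerate_cons, hne, ih (s + 1) (by omega)]

-- removing index s + k from an enumeration is take k ++ drop (k+1)
theorem pv_filter_enum {α : Type} (xs : List α) (s : Int) (k : Nat) :
    (((PySem.List.enumerate xs s).filter (fun q => q.1 != s + (k : Int))).map Prod.snd)
      = xs.take k ++ xs.drop (k + 1) := by
  induction xs generalizing s k with
  | nil => simp [PySem.List.enumerate_nil]
  | cons x xs ih =>
      cases k with
      | zero =>
          simp only [PySem.List.enumerate_cons, Nat.cast_zero, add_zero, List.filter_cons]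
          have hs : ((s, x).1 != s) = false := by simp
          rw [hs]
          simp only [Bool.false_eq_true, if_false]
          simpa using pv_filter_enum_all xs (s + 1) s (by omega)
      | succ k =>
          have hs : ((s, x).1 != s + ((k + 1 : Nat) : Int)) = true := by simp; omega
          have h2 : s + ((k + 1 : Nat) : Int) = (s + 1) + (k : Int) := by push_cast; ring
          rw [PySem.List.enumerate_cons, List.filter_cons, hs]
          simp only [if_true, List.map_cons, h2, ih (s + 1) k]
          simp

-- specialisation of pv_filter_enum at start 0
theorem pv_filter_enum_zero {α : Type} (xs : List α) (k : Nat) :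
    (((PySem.List.enumerate xs 0).filter (fun q => q.1 != (k : Int))).map Prod.snd)
      = xs.take k ++ xs.drop (k + 1) := by
  have h := pv_filter_enum xs 0 k
  simpa using h

-- join distributes over the append of two nonempty lists (char-list level)
theorem pv_chars_join_append (sep : List Char) (xs ys : List (List Char))
    (hx : xs ≠ []) (hy : ys ≠ []) :
    PySem.Chars.join sep (xs ++ ys) = PySem.Chars.join sep xs ++ sep ++ PySem.Chars.join sep ys := by
  induction xs with
  | nil => simp at hx
  | cons x xs ih =>
      cases xs with
      | nil =>
          cases ys with
          | nil => simp at hy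
          | cons y ys => simp [PySem.Chars.join_singleton, PySem.Chars.join_cons_cons]
      | cons x' xs' =>
          simp only [List.cons_append]
          rw [PySem.Chars.join_cons_cons, PySem.Chars.join_cons_cons,
              ← List.cons_append, ih (by simp)]
          simp

-- string-level version of pv_chars_join_append
theorem pv_join_append (sep : String) (xs ys : List String) (hx : xs ≠ []) (hy : ys ≠ []) :
    PySem.Str.join sep (xs ++ ys) = PySem.Str.join sep xs ++ sep ++ PySem.Str.join sep ys := by
  simp only [PySem.Str.join, List.map_append]
  rw [pv_chars_join_append sep.toList _ _ (by simpa using hx) (by simpa using hy)]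
  simp [String.ofList_append, String.ofList_toList, String.append_assoc]

-- a string is nonempty iff its char list is
theorem pv_str_ne_empty (s : String) : s ≠ "" ↔ s.toList ≠ [] := by
  rw [ne_eq, String.ext_iff]; simp

-- a join of nonempty strings over a nonempty list is nonempty
theorem pv_join_ne_empty (sep : String) (xs : List String)
    (hne : ∀ x ∈ xs, x ≠ "") (hx : xs ≠ []) : PySem.Str.join sep xs ≠ "" := by
  cases xs with
  | nil => simp at hx
  | cons x xs =>
      have hx0 : x.toList ≠ [] := (pv_str_ne_empty x).1 (hne x (by simp))
      rw [pv_str_ne_empty]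
      cases xs with
      | nil => simp [PySem.Str.toList_join, PySem.Chars.join_singleton, hx0]
      | cons y ys => simp [PySem.Str.toList_join, PySem.Chars.join_cons_cons, hx0]

-- gluing two joins of nonempty strings is the join of the concatenation
theorem pv_glue_join (xs ys : List String) (h : ∀ x ∈ xs ++ ys, x ≠ "") :
    pvGlue (PySem.Str.join ", " xs) (PySem.Str.join ", " ys) = PySem.Str.join ", " (xs ++ ys) := by
  unfold pvGlue
  cases xs with
  | nil => simp [show PySem.Str.join ", " ([] : List String) = "" from rfl]
  | cons x xs =>
      cases ys with
      | nil =>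
          simp [show PySem.Str.join ", " ([] : List String) = "" from rfl]
      | cons y ys =>
          have h1 : PySem.Str.join ", " (x :: xs) ≠ "" :=
            pv_join_ne_empty _ _ (fun z hz => h z (by simp at hz ⊢; tauto)) (by simp)
          have h2 : PySem.Str.join ", " (y :: ys) ≠ "" :=
            pv_join_ne_empty _ _ (fun z hz => h z (by simp at hz ⊢; tauto)) (by simp)
          rw [if_pos ⟨h1, h2⟩, pv_join_append _ _ _ (by simp) (by simp)]

-- the chain of partial glues: values taken by the table-building loops
def pvChain (f : String → String → String) : String → List String → List String
  | _, [] => []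
  | p, a :: r => f p a :: pvChain f (f p a) r

-- a last-element-accumulating foldl is its chain
theorem pv_fold_last (f : String → String → String) (rest : List String) :
    ∀ (ps : List String), ps ≠ [] →
    rest.foldl (fun ps a => ps ++ [f (ps.getLastD "") a]) ps = ps ++ pvChain f (ps.getLastD "") rest := by
  induction rest with
  | nil => intro ps _; simp [pvChain]
  | cons a rest ih =>
      intro ps hps
      rw [List.foldl_cons, ih (ps ++ [f (ps.getLastD "") a]) (by simp)]
      simp [pvChain]

-- pv_fold_last specialised to the suffix-table loop (beta-reduced form for rewriting)
theorem pv_fold_suf (rest : List String) (ps : List String) (hps : ps ≠ []) :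
    rest.foldl (fun ss a => ss ++ [pvGlue a (ss.getLastD "")]) ps
      = ps ++ pvChain (fun p a => pvGlue a p) (ps.getLastD "") rest :=
  pv_fold_last (fun p a => pvGlue a p) rest ps hps

-- getLastD of a singleton (rfl, named for rewriting)
theorem pv_getLastD_singleton (x d : String) : [x].getLastD d = x := rfl

-- the prefix table: chain of left glues lists the joins of growing prefixes
theorem pv_chain_pre (xs : List String) : ∀ (done : List String), (∀ x ∈ done ++ xs, x ≠ "") →
    PySem.Str.join ", " done :: pvChain pvGlue (PySem.Str.join ", " done) xs
      = (List.range (xs.length + 1)).map (fun i => PySem.Str.join ", " (done ++ xs.take i)) := by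
  induction xs with
  | nil => intro done _; simp [pvChain]
  | cons a xs ih =>
      intro done h
      have hg : pvGlue (PySem.Str.join ", " done) a = PySem.Str.join ", " (done ++ [a]) := by
        have := pv_glue_join done [a] (by intro z hz; apply h; simp at hz ⊢; tauto)
        simpa [PySem.Str.join, PySem.Chars.join_singleton, String.ofList_toList] using this
      rw [pvChain, hg, ih (done ++ [a]) (by intro z hz; apply h; simp at hz ⊢; tauto)]
      simp only [List.length_cons]
      rw [List.range_succ_eq_map (n := xs.length + 1)]
      simp [List.map_map, Function.comp_def, Nat.succ_eq_add_one, List.take_succ_cons]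

-- the suffix table: chain of right glues lists the joins of growing reversed prefixes
theorem pv_chain_suf (xs : List String) : ∀ (ys : List String), (∀ x ∈ ys ++ xs, x ≠ "") →
    PySem.Str.join ", " ys :: pvChain (fun p a => pvGlue a p) (PySem.Str.join ", " ys) xs
      = (List.range (xs.length + 1)).map (fun i => PySem.Str.join ", " ((xs.take i).reverse ++ ys)) := by
  induction xs with
  | nil => intro ys _; simp [pvChain]
  | cons a xs ih =>
      intro ys h
      have hg : pvGlue a (PySem.Str.join ", " ys) = PySem.Str.join ", " (a :: ys) := by
        have := pv_glue_join [a] ys (by intro z hz; apply h; simp at hz ⊢; tauto)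
        simpa [PySem.Str.join, PySem.Chars.join_singleton, String.ofList_toList] using this
      rw [pvChain, hg, ih (a :: ys) (by intro z hz; apply h; simp at hz ⊢; tauto)]
      simp only [List.length_cons]
      rw [List.range_succ_eq_map (n := xs.length + 1)]
      simp [List.map_map, Function.comp_def, Nat.succ_eq_add_one, List.take_succ_cons]

-- each per-chart action string is nonempty
theorem pv_act_ne (v : String) : v ++ ".timeScale().setVisibleLogicalRange(range)" ≠ "" := by
  intro h
  have := congrArg String.toList h
  simp at this

-- ===== VERDICT (by name: the statement is the Claim_ definition above) =====
theorem renderTimeSyncJs_py_spec : Claim_equal_renderTimeSyncJs_py := by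
  intro xs _
  unfold Spec_renderTimeSyncJs_py renderTimeSyncJs_py renderTimeSyncJs_py_alt
  by_cases hlen : xs.length < 2
  · simp [hlen]
  · simp only [hlen, if_false]
    rw [pv_foldl_map, List.nil_append]
    have hacts_ne : ∀ x ∈ xs.map (fun v => v ++ ".timeScale().setVisibleLogicalRange(range)"), x ≠ "" := by
      intro x hx
      simp only [List.mem_map] at hx
      obtain ⟨v, _, rfl⟩ := hx
      exact pv_act_ne v
    rw [pv_fold_last _ _ [""] (by simp), pv_fold_suf _ [""] (by simp)]
    simp only [pv_getLastD_singleton, List.singleton_append]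
    rw [show ("" : String) = PySem.Str.join ", " ([] : List String) from rfl]
    rw [pv_chain_pre _ [] (by rw [List.nil_append]; exact hacts_ne)]
    rw [pv_chain_suf _ [] (by rw [List.nil_append]; intro x hx; exact hacts_ne x (List.mem_reverse.1 hx))]
    congr 1
    apply List.ext_getElem
    · simp [PySem.List.length_enumerate]
    · intro i hi1 hi2
      simp only [List.getElem_map, List.getElem_zip, PySem.List.getElem_enumerate,
        List.getElem_drop, List.getElem_reverse, List.getElem_range]
      have hin : i < xs.length := by
        simpa [PySem.List.length_enumerate] using hi1
      simp only [zero_add, List.length_map, List.length_reverse, List.length_range,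
        List.nil_append, List.append_nil]
      rw [pv_filter_enum_zero xs i, List.map_append, List.map_take, List.map_drop,
        List.take_reverse, List.reverse_reverse]
      simp only [List.length_map]
      have hK : xs.length - (xs.length + 1 - 1 - (1 + i)) = i + 1 := by omega
      rw [hK]
      have hne : ∀ x ∈ (xs.map (fun v => v ++ ".timeScale().setVisibleLogicalRange(range)")).take i
          ++ (xs.map (fun v => v ++ ".timeScale().setVisibleLogicalRange(range)")).drop (i + 1), x ≠ "" := by
        intro z hz
        rcases List.mem_append.1 hz with h1 | h1
        · exact hacts_ne z (List.mem_of_mem_take h1)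
        · exact hacts_ne z (List.mem_of_mem_drop h1)
      rw [← pv_glue_join _ _ hne]
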